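-- pv_equiv track=rewrite | github.com/TopiasHarjunpaa/C4AI | src/services/ai_service.py | sort_column_order
-- ===== SOURCE A (Python) =====
-- def sort_column_order(columns):
--     """Sorts available column order primarily by heuristic values
--     and secondarily by the middle column order (default order)
--
--     Args:
--         columns (list): List of available columns
--
--     Returns:
--         list: Returns sorted list of available columns
--     """
--
--     column_order = []
--     default_order = [3, 2, 4, 1, 5, 0, 6]
--     values = sorted(set(map(lambda x: x[0], columns)), reverse=True)
--     grouped_by_value = [[t[1]
--                          for t in columns if t[0] == value] for value in values]
--     for cols in grouped_by_value:
--         for col in default_order: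
--             if col in cols:
--                 column_order.append(col)
--     return column_order
-- ===== SOURCE B (Python) =====
-- def sort_column_order(columns):
--     """Single keyed sort: primary key = heuristic value descending,
--     secondary key = position in the default (middle-first) column order."""
--     default_order = [3, 2, 4, 1, 5, 0, 6]
--     rank = {col: i for i, col in enumerate(default_order)}
--     pairs = {(value, col) for (value, col) in columns if col in rank}
--     ordered = sorted(pairs, key=lambda p: (-p[0], rank[p[1]]))
--     return [col for (_, col) in ordered]
-- ===== Notes on version B (the rewrite author's own statement) =====
-- stated objective: simpler
-- what changed: Replaces the group-by-distinct-value then scan-default-order-per-group structure by one keyed sort of the distinct (value, column) pairs under the key (-value, default-order rank), then a projection to columns.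
import Mathlib
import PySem

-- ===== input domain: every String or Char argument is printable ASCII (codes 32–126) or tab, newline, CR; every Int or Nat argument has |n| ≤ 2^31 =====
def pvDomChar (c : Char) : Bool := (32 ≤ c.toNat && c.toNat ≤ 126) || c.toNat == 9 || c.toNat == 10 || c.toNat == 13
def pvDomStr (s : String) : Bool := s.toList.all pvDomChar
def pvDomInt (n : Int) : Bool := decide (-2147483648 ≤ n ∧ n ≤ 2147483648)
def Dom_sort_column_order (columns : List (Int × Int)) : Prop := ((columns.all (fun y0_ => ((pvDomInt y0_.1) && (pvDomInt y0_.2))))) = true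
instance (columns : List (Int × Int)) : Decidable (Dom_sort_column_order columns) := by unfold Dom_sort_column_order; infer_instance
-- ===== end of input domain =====

-- B replaces A's group-by-distinct-value-then-scan-default-order structure by one keyed
-- sort of the distinct (value, column) pairs, for simplicity; return values proved equal.

-- ===== PORT A =====
def sort_column_order (columns : List (Int × Int)) : List Int :=
  let column_order : List Int := []
  let default_order : List Int := [3, 2, 4, 1, 5, 0, 6]
  let values := PySem.List.sorted (PySem.Set.ofList (columns.map (fun x => x.1))) (fun x => x) true
  let grouped_by_value := values.map (fun value => (columns.filter (fun t => t.1 == value)).map (fun t => t.2))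
  grouped_by_value.foldl (fun acc cols =>
    default_order.foldl (fun acc2 col => if cols.contains col then acc2 ++ [col] else acc2) acc) column_order

-- ===== PORT B =====
def sort_column_order_alt (columns : List (Int × Int)) : List Int :=
  let default_order : List Int := [3, 2, 4, 1, 5, 0, 6]
  let rank : PySem.Dict Int Int :=
    (PySem.List.enumerate default_order).foldl (fun d ic => d.insert ic.2 ic.1) (PySem.Dict.mk [])
  let pairs : PySem.Set (Int × Int) :=
    PySem.Set.ofList (columns.filter (fun p => (rank.get? p.2).isSome))
  -- rank[p[1]] is exact here: the filter keeps only columns that are keys of rank, so get? is some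
  let ordered := PySem.List.sorted2 pairs (fun p => -p.1) (fun p => (rank.get? p.2).getD 0) false
  ordered.map (fun p => p.2)

-- ===== PRECONDITION & SPEC =====
def Spec_sort_column_order (columns : List (Int × Int)) (out : List Int) : Prop := out = sort_column_order_alt columns
instance (columns : List (Int × Int)) (out : List Int) : Decidable (Spec_sort_column_order columns out) := by unfold Spec_sort_column_order; infer_instance

-- ===== CLAIM (what is proved, stated in full; the proofs are below) =====
def Claim_equal_sort_column_order : Prop := ∀ (columns : List (Int × Int)), Dom_sort_column_order columns → Spec_sort_column_order columns (sort_column_order columns)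

-- ===== LEMMAS AND PROOFS =====

-- the default column order and B's rank dictionary, named for the proofs
def pvD : List Int := [3, 2, 4, 1, 5, 0, 6]

def pvRank : PySem.Dict Int Int :=
  (PySem.List.enumerate pvD).foldl (fun d ic => d.insert ic.2 ic.1) (PySem.Dict.mk [])

def pvRk (c : Int) : Int := (pvRank.get? c).getD 0

-- single Int key lex-equivalent to the tuple key (-value, rank col), since ranks lie in [0, 7)
def pvKey (p : Int × Int) : Int := -7 * p.1 + pvRk p.2

-- the distinct values of columns, descending (as port A computes them)
def pvValues (columns : List (Int × Int)) : List Int :=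
  PySem.List.sorted (PySem.Set.ofList (columns.map (fun x => x.1))) (fun x => x) true

-- the canonical result as a pair list: groups by value descending, each group in default order
def pvL (columns : List (Int × Int)) : List (Int × Int) :=
  (pvValues columns).flatMap (fun v => (pvD.filter (fun c => decide ((v, c) ∈ columns))).map (fun c => (v, c)))

lemma pvRk_bounds (c : Int) : 0 ≤ pvRk c ∧ pvRk c < 7 := by
  simp only [pvRk, show pvRank = PySem.Dict.mk [(3,0),(2,1),(4,2),(1,3),(5,4),(0,5),(6,6)] from rfl,
    PySem.Dict.get?, List.find?]
  (repeat' split) <;> simp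

lemma getD_rk (c : Int) : (pvRank.get? c).getD 0 = pvRk c := rfl

lemma pvRank_isSome (c : Int) : (pvRank.get? c).isSome = decide (c ∈ pvD) := by
  simp only [show pvRank = PySem.Dict.mk [(3,0),(2,1),(4,2),(1,3),(5,4),(0,5),(6,6)] from rfl,
    PySem.Dict.get?, List.find?, pvD]
  (repeat' split) <;> (simp_all; try omega)

lemma pvRk_pairwise : pvD.Pairwise (fun a b => pvRk a < pvRk b) := by decide

lemma pvValues_nodup (columns : List (Int × Int)) : (pvValues columns).Nodup :=
  (PySem.List.sorted_perm _ _ _).nodup_iff.mpr (PySem.Set.nodup_ofList _)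

lemma mem_pvValues (columns : List (Int × Int)) (v : Int) :
    v ∈ pvValues columns ↔ v ∈ columns.map (fun x => x.1) := by
  rw [pvValues, PySem.List.mem_sorted, PySem.Set.mem_ofList]

lemma contains_eq (columns : List (Int × Int)) (v c : Int) :
    ((columns.filter (fun t => t.1 == v)).map (fun t => t.2)).contains c = decide ((v, c) ∈ columns) := by
  rw [Bool.eq_iff_iff]
  simp only [List.contains_iff_mem, decide_eq_true_iff, List.mem_map, List.mem_filter, beq_iff_eq]
  constructor
  · rintro ⟨⟨a,b⟩, ⟨hm, h1⟩, h2⟩; simp only at h1 h2; subst h1; subst h2; exact hm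
  · intro h; exact ⟨(v,c), ⟨h, rfl⟩, rfl⟩

lemma A_eq_L (columns : List (Int × Int)) :
    sort_column_order columns = (pvL columns).map (fun p => p.2) := by
  simp only [sort_column_order, pvL, pvValues]
  have h1 : (fun (acc : List Int) (cols : List Int) =>
      ([3, 2, 4, 1, 5, 0, 6] : List Int).foldl (fun acc2 col => if cols.contains col then acc2 ++ [col] else acc2) acc)
      = fun acc cols => acc ++ ([3, 2, 4, 1, 5, 0, 6] : List Int).filter (fun col => cols.contains col) := by
    funext acc cols
    exact PySem.List.foldl_append_if_eq_filter _ _ _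
  rw [h1, PySem.List.foldl_append_eq_flatMap]
  simp only [List.nil_append, List.flatMap_map, List.map_flatMap, List.map_map]
  refine List.flatMap_congr fun v hv => ?_
  rw [show ((fun (t : Int × Int) => t.2) ∘ fun c => (v, c)) = (id : Int → Int) from rfl, List.map_id]
  show List.filter _ pvD = _
  rw [List.filter_congr (fun c _ => contains_eq columns v c)]

lemma sorted2_eq_sorted (xs : List (Int × Int)) :
    PySem.List.sorted2 xs (fun p => -p.1) (fun p => (pvRank.get? p.2).getD 0) false
      = PySem.List.sorted xs pvKey false := by
  simp only [PySem.List.sorted2, PySem.List.sorted, if_neg (by decide : ¬ (false = true))]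
  congr 1
  funext acc x
  congr 1
  funext a b
  have ha := pvRk_bounds a.2
  have hb := pvRk_bounds b.2
  rw [Bool.eq_iff_iff]
  simp only [Bool.or_eq_true, Bool.and_eq_true, Bool.not_eq_eq_eq_not, Bool.not_true,
    decide_eq_true_iff, decide_eq_false_iff_not, pvKey, getD_rk]
  omega

lemma mem_pvL (columns : List (Int × Int)) (x : Int × Int) :
    x ∈ pvL columns ↔ x ∈ columns ∧ x.2 ∈ pvD := by
  simp only [pvL, List.mem_flatMap, List.mem_map, List.mem_filter, decide_eq_true_iff]
  constructor
  · rintro ⟨v, hv, c, ⟨⟨hcD, hcm⟩, rfl⟩⟩; exact ⟨hcm, hcD⟩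
  · rintro ⟨hm, hD⟩
    exact ⟨x.1, (mem_pvValues columns x.1).mpr (List.mem_map.mpr ⟨x, hm, rfl⟩),
      x.2, ⟨hD, by simpa using hm⟩, rfl⟩

lemma pvL_nodup (columns : List (Int × Int)) : (pvL columns).Nodup := by
  rw [pvL, List.Nodup, List.pairwise_flatMap]
  constructor
  · intro v _
    refine List.Pairwise.map _ (fun c c' h => ?_) ((pvRk_pairwise.filter _).imp (fun {a b} h => h))
    simp only [ne_eq, Prod.mk.injEq, not_and]
    intro _ hcc; subst hcc; exact absurd h (lt_irrefl _)
  · refine ((pvValues_nodup columns).imp (fun {a b} hne => ?_))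
    rintro x hx y hy rfl
    rcases List.mem_map.mp hx with ⟨c, _, rfl⟩
    rcases List.mem_map.mp hy with ⟨c', _, h⟩
    exact hne (by simpa using congrArg Prod.fst h.symm)

lemma L_perm (columns : List (Int × Int)) :
    (pvL columns).Perm (PySem.Set.ofList (columns.filter (fun p => decide (p.2 ∈ pvD)))) := by
  rw [List.perm_ext_iff_of_nodup (pvL_nodup columns) (PySem.Set.nodup_ofList _)]
  intro x
  rw [mem_pvL, PySem.Set.mem_ofList, List.mem_filter, decide_eq_true_iff]

lemma L_pairwise (columns : List (Int × Int)) :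
    (pvL columns).Pairwise (fun a b => pvKey a < pvKey b) := by
  rw [pvL, List.pairwise_flatMap]
  constructor
  · intro v _
    refine List.Pairwise.map _ (fun c c' h => ?_) ((pvRk_pairwise.filter _).imp (fun {a b} h => h))
    simp only [pvKey]; omega
  · have hdesc := PySem.List.sorted_pairwise_rev (PySem.Set.ofList (columns.map (fun x => x.1))) (fun x => x)
    have hnd : (pvValues columns).Pairwise (fun a b => a ≠ b) := pvValues_nodup columns
    refine ((hdesc.and hnd).imp (fun {a b} hab => ?_))
    rintro x hx y hy
    rcases List.mem_map.mp hx with ⟨c, hc, rfl⟩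
    rcases List.mem_map.mp hy with ⟨c', hc', rfl⟩
    have h1 := pvRk_bounds c
    have h2 := pvRk_bounds c'
    have : b < a := lt_of_le_of_ne hab.1 (Ne.symm hab.2)
    simp only [pvKey]; omega

lemma B_eq_L (columns : List (Int × Int)) :
    sort_column_order_alt columns = (pvL columns).map (fun p => p.2) := by
  show (PySem.List.sorted2
      (PySem.Set.ofList (columns.filter (fun p => (pvRank.get? p.2).isSome)))
      (fun p => -p.1) (fun p => (pvRank.get? p.2).getD 0) false).map (fun p => p.2) = _
  rw [sorted2_eq_sorted, List.filter_congr (fun p _ => pvRank_isSome p.2),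
    PySem.List.sorted_eq_of_perm_of_pairwise_lt _ (pvL columns) pvKey (L_perm columns) (L_pairwise columns)]

-- ===== VERDICT (by name: the statement is the Claim_ definition above) =====
theorem sort_column_order_spec : Claim_equal_sort_column_order := by
  intro columns _
  unfold Spec_sort_column_order
  rw [A_eq_L, B_eq_L]
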